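-- pv_equiv track=rewrite | github.com/djtcp/itmo | project1_5b.py | resultTuple
-- ===== SOURCE A (Python) =====
-- def resultTuple(tlv):
--     if (len(tlv) == 0):
--         return "List is empty"
--
--     maxvalue = []
--     minvalue = []
--     for value in tlv:
--         if int(value) <= 0:
--             maxvalue.append(value)
--         else:
--             minvalue.append(value)
--
--     maxvalue.sort()
--     minvalue.sort(reverse=True)
--
--     resultTuple = (maxvalue, minvalue)
--     return resultTuple
-- ===== SOURCE B (Python) =====
-- def resultTuple(tlv):
--     if len(tlv) == 0:
--         return "List is empty"
--     asc = sorted(tlv)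
--     desc = sorted(tlv, reverse=True)
--     maxvalue = [v for v in asc if int(v) <= 0]
--     minvalue = [v for v in desc if int(v) > 0]
--     return (maxvalue, minvalue)
-- ===== Notes on version B (the rewrite author's own statement) =====
-- stated objective: alternative
-- what changed: B sorts the whole input twice (ascending and descending) and then filters each sorted list by sign, instead of A's partition-into-two-lists loop followed by sorting each partition.
-- outside the precondition, e.g. on resultTuple([]): A returns 'List is empty', B returns 'List is empty'
import Mathlib
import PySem

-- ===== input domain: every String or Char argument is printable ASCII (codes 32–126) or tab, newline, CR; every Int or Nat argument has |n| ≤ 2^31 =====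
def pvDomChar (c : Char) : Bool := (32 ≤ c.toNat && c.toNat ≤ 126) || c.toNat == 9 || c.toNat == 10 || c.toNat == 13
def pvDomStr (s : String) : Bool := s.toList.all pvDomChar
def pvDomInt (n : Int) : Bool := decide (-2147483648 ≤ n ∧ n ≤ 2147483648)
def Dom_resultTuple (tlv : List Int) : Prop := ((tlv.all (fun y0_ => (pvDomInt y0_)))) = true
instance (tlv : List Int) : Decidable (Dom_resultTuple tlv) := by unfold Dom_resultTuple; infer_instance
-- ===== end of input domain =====

-- B sorts the full input twice (ascending and descending) and filters each by sign; equivalence proved on non-empty lists.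

-- ===== PORT A =====
-- partition loop over tlv into (maxvalue, minvalue), then sort each (int(value) is the identity on Int)
def resultTuple (tlv : List Int) : List Int × List Int :=
  let acc := tlv.foldl
    (fun (acc : List Int × List Int) value =>
      if value ≤ 0 then (acc.1 ++ [value], acc.2) else (acc.1, acc.2 ++ [value]))
    ([], [])
  (PySem.List.sorted acc.1 (fun x => x) false, PySem.List.sorted acc.2 (fun x => x) true)

-- ===== PORT B =====
def resultTuple_alt (tlv : List Int) : List Int × List Int :=
  let asc := PySem.List.sorted tlv (fun x => x) false
  let desc := PySem.List.sorted tlv (fun x => x) true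
  (asc.filter (fun v => decide (v ≤ 0)), desc.filter (fun v => decide (0 < v)))

-- ===== PRECONDITION & SPEC =====
-- Pre_ excludes only the empty list, on which A returns the string "List is empty" instead of a pair of lists.
def Pre_resultTuple (tlv : List Int) : Prop := tlv ≠ []
instance (tlv : List Int) : Decidable (Pre_resultTuple tlv) := by unfold Pre_resultTuple; infer_instance
def pvWitness_resultTuple : List Int := [1, -2, 0]

def Spec_resultTuple (tlv : List Int) (out : List Int × List Int) : Prop := out = resultTuple_alt tlv
instance (tlv : List Int) (out : List Int × List Int) : Decidable (Spec_resultTuple tlv out) := by unfold Spec_resultTuple; infer_instance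

-- ===== CLAIM (what is proved, stated in full; the proofs are below) =====
def Claim_equal_resultTuple : Prop := ∀ (tlv : List Int), Dom_resultTuple tlv → Pre_resultTuple tlv → Spec_resultTuple tlv (resultTuple tlv)

-- ===== LEMMAS AND PROOFS =====

-- A's partition loop produces (filter (≤ 0), filter (> 0)).
theorem foldl_partition (tlv : List Int) (a b : List Int) :
    tlv.foldl
      (fun (acc : List Int × List Int) value =>
        if value ≤ 0 then (acc.1 ++ [value], acc.2) else (acc.1, acc.2 ++ [value]))
      (a, b)
    = (a ++ tlv.filter (fun v => decide (v ≤ 0)), b ++ tlv.filter (fun v => decide (0 < v))) := by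
  induction tlv generalizing a b with
  | nil => simp
  | cons x t ih =>
    by_cases hx : x ≤ 0
    · simp [List.foldl_cons, hx, ih, List.filter_cons, not_lt.mpr hx]
    · simp [List.foldl_cons, hx, ih, List.filter_cons, not_le.mp hx]

-- sorting (with identity key) commutes with filtering, both ascending and descending.
theorem sorted_filter_comm (p : Int → Bool) (tlv : List Int) (rev : Bool) :
    PySem.List.sorted (tlv.filter p) (fun x => x) rev
      = (PySem.List.sorted tlv (fun x => x) rev).filter p := by
  have hperm : (PySem.List.sorted (tlv.filter p) (fun x => x) rev).Perm
      ((PySem.List.sorted tlv (fun x => x) rev).filter p) := by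
    exact (PySem.List.sorted_perm _ _ _).trans
      ((PySem.List.sorted_perm tlv (fun x => x) rev).filter p).symm
  cases rev with
  | false =>
    refine PySem.List.eq_of_perm_of_pairwise_le_of_injective (fun x : Int => x)
      (fun a b h => h) hperm ?_ ?_
    · exact PySem.List.sorted_pairwise _ _
    · exact List.Pairwise.sublist (List.filter_sublist) (PySem.List.sorted_pairwise _ _)
  | true =>
    refine PySem.List.eq_of_perm_of_pairwise_le_of_injective (fun x : Int => -x)
      (fun a b h => neg_inj.mp h) hperm ?_ ?_
    · exact (PySem.List.sorted_pairwise_rev _ _).imp (fun h => neg_le_neg h)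
    · exact (List.Pairwise.sublist (List.filter_sublist) (PySem.List.sorted_pairwise_rev _ _)).imp
        (fun h => neg_le_neg h)

-- ===== VERDICT (by name: the statement is the Claim_ definition above) =====
theorem resultTuple_spec : Claim_equal_resultTuple := by
  intro tlv _ _
  unfold Spec_resultTuple resultTuple resultTuple_alt
  simp only [foldl_partition tlv [] [], List.nil_append]
  rw [sorted_filter_comm, sorted_filter_comm]
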